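-- pv_equiv track=rewrite | github.com/OsBelief/little-skills | json-formatter/scripts/format_json.py | is_string_complete
-- ===== SOURCE A (Python) =====
-- def is_string_complete(s: str) -> bool:
--     """
--     检查字符串中的引号是否平衡(考虑转义)
--
--     Args:
--         s: 字符串
--
--     Returns:
--         引号是否平衡
--     """
--     in_string = False
--     i = 0
--     while i < len(s):
--         if s[i] == '\\':
--             i += 2  # 跳过转义字符
--             continue
--         if s[i] == '"':
--             in_string = not in_string
--         i += 1
--     return not in_string
-- ===== SOURCE B (Python) =====
-- import re
--
-- def is_string_complete(s: str) -> bool: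
--     # Strip every escape sequence (backslash + following char) in one pass,
--     # then the quotes are balanced iff an even number of quotes survive.
--     stripped = re.sub(r'\\.', '', s, flags=re.DOTALL)
--     return stripped.count('"') % 2 == 0
-- ===== Notes on version B (the rewrite author's own statement) =====
-- stated objective: idiomatic
-- what changed: Replaced the stateful index/while toggle loop by a two-phase decomposition: a regex strips every backslash escape pair in one step, then quote balance is an even count of the surviving quotes.
import Mathlib
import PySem

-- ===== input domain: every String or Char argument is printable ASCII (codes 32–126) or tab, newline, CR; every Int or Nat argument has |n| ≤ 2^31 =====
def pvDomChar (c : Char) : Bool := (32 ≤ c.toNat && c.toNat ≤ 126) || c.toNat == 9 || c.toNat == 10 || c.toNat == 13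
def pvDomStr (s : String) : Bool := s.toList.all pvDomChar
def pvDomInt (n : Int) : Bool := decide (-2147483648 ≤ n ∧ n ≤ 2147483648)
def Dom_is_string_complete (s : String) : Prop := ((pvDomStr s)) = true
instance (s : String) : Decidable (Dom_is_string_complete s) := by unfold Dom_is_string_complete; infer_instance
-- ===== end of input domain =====

-- ===== PORT A =====
-- A: while-loop over indices, toggling in_string on each unescaped quote;
-- ported as structural recursion on the character list (i+=2 skips the escaped char).
def pvLoopA : List Char → Bool → Bool
  | [], inString => !inString
  | '\\' :: [], inString => !inString        -- i += 2 runs past the end, loop exits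
  | '\\' :: _ :: rest, inString => pvLoopA rest inString
  | '"' :: rest, inString => pvLoopA rest (!inString)
  | _ :: rest, inString => pvLoopA rest inString

def is_string_complete (s : String) : Bool := pvLoopA s.toList false

-- ===== PORT B =====
-- B: re.sub(r'\\.', '', s, flags=re.DOTALL) ported by hand (exact: deletes each
-- backslash together with its following character; a lone trailing backslash stays),
-- then count the surviving quotes and test evenness.
def pvStrip : List Char → List Char
  | [] => []
  | '\\' :: [] => ['\\']
  | '\\' :: _ :: rest => pvStrip rest
  | c :: rest => c :: pvStrip rest

def is_string_complete_alt (s : String) : Bool := (pvStrip s.toList).count '"' % 2 == 0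

-- ===== PRECONDITION & SPEC =====
def Spec_is_string_complete (s : String) (out : Bool) : Prop := out = is_string_complete_alt s
instance (s : String) (out : Bool) : Decidable (Spec_is_string_complete s out) := by unfold Spec_is_string_complete; infer_instance

-- ===== CLAIM (what is proved, stated in full; the proofs are below) =====
def Claim_equal_is_string_complete : Prop := ∀ (s : String), Dom_is_string_complete s → Spec_is_string_complete s (is_string_complete s)

-- ===== LEMMAS AND PROOFS =====

-- Loop invariant: A's toggle loop returns the negation of (initial state XOR parity
-- of the quotes surviving pvStrip).
theorem pvLoopA_eq (l : List Char) (b : Bool) :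
    pvLoopA l b = !(b ^^ ((pvStrip l).count '"' % 2 == 1)) := by
  induction l, b using pvLoopA.induct with
  | case1 b => simp [pvLoopA, pvStrip]
  | case2 b => simp [pvLoopA, pvStrip]
  | case3 c rest b ih => simpa [pvLoopA, pvStrip] using ih
  | case4 rest b ih =>
      have hs : pvStrip ('"' :: rest) = '"' :: pvStrip rest := by
        cases rest <;> simp [pvStrip]
      rw [show pvLoopA ('"' :: rest) b = pvLoopA rest (!b) by
            cases rest <;> simp [pvLoopA], ih, hs]
      have hc : (('"' :: pvStrip rest).count '"') = (pvStrip rest).count '"' + 1 := by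
        simp
      rw [hc]
      rcases Nat.mod_two_eq_zero_or_one ((pvStrip rest).count '"') with h2 | h2 <;>
        simp [Nat.add_mod, h2]
  | case5 c rest b h1 h2 h3 ih =>
      have hbs : c ≠ '\\' := by
        intro h; cases rest with
        | nil => exact h1 h rfl
        | cons d rs => exact h2 d rs h rfl
      have hq : c ≠ '"' := fun h => h3 h
      have hs : pvStrip (c :: rest) = c :: pvStrip rest := by
        cases rest <;> simp [pvStrip]
      rw [show pvLoopA (c :: rest) b = pvLoopA rest b by
            cases rest <;> simp [pvLoopA],
          hs]
      have : ((c :: pvStrip rest).count '"') = (pvStrip rest).count '"' := by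
        simp [hq]
      rw [this]; exact ih

-- ===== VERDICT (by name: the statement is the Claim_ definition above) =====
theorem is_string_complete_spec : Claim_equal_is_string_complete := by
  intro s _
  unfold Spec_is_string_complete is_string_complete is_string_complete_alt
  rw [pvLoopA_eq]
  rcases Nat.mod_two_eq_zero_or_one ((pvStrip s.toList).count '"') with h | h <;> simp [h]
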